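-- pv_equiv track=rewrite | github.com/KMaciejewsk/AiSD | sortowanie.py | gen_vshape
-- ===== SOURCE A (Python) =====
-- def gen_vshape(n):
--     arr = []
--     temp = n
--     for i in range(n//2):
--         arr.append(temp)
--         temp -= 2
--     temp += 1
--     for i in range(n//2,n):
--         arr.append(temp)
--         temp += 2
--     return arr
-- ===== SOURCE B (Python) =====
-- def gen_vshape(n):
--     h = n // 2
--     return [n - 2 * i if i < h else n - 2 * h + 1 + 2 * (i - h) for i in range(n)]
-- ===== Notes on version B (the rewrite author's own statement) =====
-- stated objective: simpler
-- what changed: Replaces the two sequential accumulator loops carrying a mutable temp with a single list comprehension that computes each element directly from its index via a closed-form formula split at h = n//2.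
import Mathlib
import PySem

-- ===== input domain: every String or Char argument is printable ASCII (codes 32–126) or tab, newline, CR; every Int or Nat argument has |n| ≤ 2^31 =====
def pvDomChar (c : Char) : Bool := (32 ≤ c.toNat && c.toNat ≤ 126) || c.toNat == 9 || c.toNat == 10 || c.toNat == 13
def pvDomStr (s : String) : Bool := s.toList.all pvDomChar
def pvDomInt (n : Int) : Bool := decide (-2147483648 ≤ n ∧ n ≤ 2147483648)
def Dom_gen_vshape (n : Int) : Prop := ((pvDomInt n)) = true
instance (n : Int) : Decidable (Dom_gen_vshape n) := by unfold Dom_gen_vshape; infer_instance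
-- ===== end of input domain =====

-- B replaces A's two mutable-accumulator loops with one index-driven closed-form comprehension (objective: simpler).

-- ===== PORT A =====
def gen_vshape (n : Int) : List Int :=
  let s1 := (PySem.List.pyRange 0 (PySem.Int.floordiv n 2) 1).foldl
    (fun (st : List Int × Int) _ => (st.1 ++ [st.2], st.2 - 2)) ([], n)
  let temp := s1.2 + 1
  let s2 := (PySem.List.pyRange (PySem.Int.floordiv n 2) n 1).foldl
    (fun (st : List Int × Int) _ => (st.1 ++ [st.2], st.2 + 2)) (s1.1, temp)
  s2.1

-- ===== PORT B =====
def gen_vshape_alt (n : Int) : List Int :=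
  let h := PySem.Int.floordiv n 2
  (PySem.List.pyRange 0 n 1).map (fun i => if i < h then n - 2 * i else n - 2 * h + 1 + 2 * (i - h))

-- ===== PRECONDITION & SPEC =====
def Spec_gen_vshape (n : Int) (out : List Int) : Prop := out = gen_vshape_alt n
instance (n : Int) (out : List Int) : Decidable (Spec_gen_vshape n out) := by unfold Spec_gen_vshape; infer_instance

-- ===== CLAIM (what is proved, stated in full; the proofs are below) =====
def Claim_equal_gen_vshape : Prop := ∀ (n : Int), Dom_gen_vshape n → Spec_gen_vshape n (gen_vshape n)

-- ===== LEMMAS AND PROOFS =====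

-- A's append-and-step loop, characterised: it emits the arithmetic progression t, t+d, ...
theorem vshape_loop (l : List Int) (a : List Int) (t d : Int) :
    l.foldl (fun (st : List Int × Int) _ => (st.1 ++ [st.2], st.2 + d)) (a, t)
      = (a ++ (List.range l.length).map (fun (j : Nat) => t + d * (j : Int)),
         t + d * (l.length : Int)) := by
  induction l generalizing a t with
  | nil => simp
  | cons x xs ih =>
    simp only [List.foldl_cons, ih, List.length_cons]
    refine Prod.ext ?_ ?_
    · simp only [List.range_succ_eq_map, List.map_cons, List.map_map,
        List.append_assoc, List.singleton_append]
      norm_num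
      intro a _
      ring
    · push_cast; ring

theorem gen_vshape_spec' (n : Int) : gen_vshape n = gen_vshape_alt n := by
  have h2 : PySem.Int.floordiv n 2 = n / 2 := PySem.Int.floordiv_eq_ediv_of_pos (by omega)
  by_cases hn : n <= 0
  · have e1 : PySem.List.pyRange 0 (n / 2) 1 = [] :=
      PySem.List.pyRange_one_eq_nil (by omega)
    have e2 : PySem.List.pyRange (n / 2) n 1 = [] :=
      PySem.List.pyRange_one_eq_nil (by omega)
    have e3 : PySem.List.pyRange 0 n 1 = [] := PySem.List.pyRange_one_eq_nil (by omega)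
    simp [gen_vshape, gen_vshape_alt, e1, e2, e3]
  · obtain ⟨h, hdef⟩ : ∃ h, PySem.Int.floordiv n 2 = h := ⟨_, rfl⟩
    rw [h2] at hdef
    have hb : 2 * h ≤ n ∧ n ≤ 2 * h + 1 ∧ 0 ≤ h ∧ h ≤ n := by omega
    have hsplit : PySem.List.pyRange 0 n 1
        = PySem.List.pyRange 0 h 1 ++ PySem.List.pyRange h n 1 :=
      PySem.List.pyRange_one_append 0 h n (by omega) (by omega)
    have len1 : (PySem.List.pyRange 0 h 1).length = h.toNat := by
      rw [PySem.List.length_pyRange_one]; omega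
    have len2 : (PySem.List.pyRange h n 1).length = (n - h).toNat := by
      rw [PySem.List.length_pyRange_one]
    have hth : (h.toNat : Int) = h := by omega
    -- A in closed form
    have hA : gen_vshape n
        = (List.range h.toNat).map (fun (j : Nat) => n + (-2) * (j : Int))
          ++ (List.range (n - h).toNat).map
               (fun (j : Nat) => (n + (-2) * ((h.toNat : Int)) + 1) + 2 * (j : Int)) := by
      have step1 := vshape_loop (PySem.List.pyRange 0 h 1) [] n (-2)
      have step2 := vshape_loop (PySem.List.pyRange h n 1)
        ((List.range h.toNat).map (fun (j : Nat) => n + (-2) * (j : Int)))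
        (n + (-2) * ((h.toNat : Int)) + 1) 2
      simp only [len1] at step1
      simp only [len2] at step2
      have e1 : (fun (st : List Int × Int) (_ : Int) => (st.1 ++ [st.2], st.2 - 2))
          = (fun (st : List Int × Int) (_ : Int) => (st.1 ++ [st.2], st.2 + (-2))) := by
        funext st x; simp [sub_eq_add_neg]
      simp only [gen_vshape, h2, hdef]
      rw [e1]
      simp only [step1, List.nil_append]
      simp only [step2]
    -- B in closed form, piecewise
    have hB : gen_vshape_alt n
        = (PySem.List.pyRange 0 h 1).map (fun i => n - 2 * i)
          ++ (PySem.List.pyRange h n 1).map (fun i => n - 2 * h + 1 + 2 * (i - h)) := by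
      simp only [gen_vshape_alt, h2, hdef, hsplit, List.map_append]
      congr 1
      · refine List.map_congr_left ?_
        intro i hi
        rw [PySem.List.mem_pyRange_one] at hi
        simp [if_pos hi.2]
      · refine List.map_congr_left ?_
        intro i hi
        rw [PySem.List.mem_pyRange_one] at hi
        rw [if_neg (by omega : ¬ i < h)]
    rw [hA, hB, PySem.List.pyRange_one 0 h, PySem.List.pyRange_one h n]
    have hz : (h - 0).toNat = h.toNat := by omega
    rw [hz]
    congr 1
    · simp only [List.map_map]
      refine List.map_congr_left ?_
      intro j _
      simp [Function.comp]
      ring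
    · simp only [List.map_map]
      refine List.map_congr_left ?_
      intro j _
      simp only [Function.comp, hth]
      ring

-- ===== VERDICT (by name: the statement is the Claim_ definition above) =====
theorem gen_vshape_spec : Claim_equal_gen_vshape := by
  intro n _
  unfold Spec_gen_vshape
  exact gen_vshape_spec' n
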